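-- pv_equiv track=rewrite | github.com/pjnt9372/Capture_Push | gui/schedule_window.py | format_weeks_list
-- ===== SOURCE A (Python) =====
-- def format_weeks_list(weeks_list):
--     """将周次列表格式化为字符串"""
--     if not weeks_list or "全学期" in weeks_list:
--         return "1-20"
--
--     if not weeks_list:
--         return "1-20"
--
--     # 尝试将连续数字合并为范围，如 [1,2,3,5,7,8,9] -> "1-3,5,7-9"
--     if len(weeks_list) == 1:
--         return str(weeks_list[0])
--
--     # 排序
--     weeks_list = sorted(set(weeks_list))
--
--     result = []
--     i = 0
--     while i < len(weeks_list):
--         start = weeks_list[i]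
--         end = start
--
--         # 查找连续序列
--         while i + 1 < len(weeks_list) and weeks_list[i + 1] == end + 1:
--             end = weeks_list[i + 1]
--             i += 1
--
--         if start == end:
--             result.append(str(start))
--         else:
--             result.append(f"{start}-{end}")
--
--         i += 1
--
--     return ','.join(result)
-- ===== SOURCE B (Python) =====
-- def format_weeks_list(weeks_list):
--     """将周次列表格式化为字符串 — builds the runs back-to-front in one reverse pass."""
--     if not weeks_list or "全学期" in weeks_list:
--         return "1-20"
--
--     if len(weeks_list) == 1:
--         return str(weeks_list[0])
--
--     weeks = sorted(set(weeks_list))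
--
--     runs = []
--     for x in reversed(weeks):
--         if runs and runs[-1][0] == x + 1:
--             runs[-1] = (x, runs[-1][1])
--         else:
--             runs.append((x, x))
--     runs.reverse()
--
--     return ','.join(str(a) if a == b else f"{a}-{b}" for a, b in runs)
-- ===== Notes on version B (the rewrite author's own statement) =====
-- stated objective: alternative
-- what changed: A merges runs with a forward index walk and an inner lookahead while-loop; B makes a single reverse pass over the sorted distinct weeks, building the run list back-to-front by extending the front run when the current value is one below its start.
import Mathlib
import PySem

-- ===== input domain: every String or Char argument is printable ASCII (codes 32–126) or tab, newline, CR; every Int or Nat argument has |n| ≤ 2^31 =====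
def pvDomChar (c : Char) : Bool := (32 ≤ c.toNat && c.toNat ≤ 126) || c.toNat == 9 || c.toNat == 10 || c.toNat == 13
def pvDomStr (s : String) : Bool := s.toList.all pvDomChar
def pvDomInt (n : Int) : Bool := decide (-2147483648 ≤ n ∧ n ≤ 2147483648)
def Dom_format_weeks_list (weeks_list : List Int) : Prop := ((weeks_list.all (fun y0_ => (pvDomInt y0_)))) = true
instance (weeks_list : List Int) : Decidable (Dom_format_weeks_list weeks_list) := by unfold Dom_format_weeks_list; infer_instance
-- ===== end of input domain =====

-- B replaces A's forward index walk with inner lookahead by a single reverse pass that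
-- builds the run list back-to-front (objective: alternative decomposition, same cost).

-- shared run formatter: str(start) if start == end else f"{start}-{end}"
-- (the identical expression appears in both Pythons)
def pvFmt (a b : Int) : String :=
  if a = b then PySem.Int.toStr a else PySem.Int.toStr a ++ "-" ++ PySem.Int.toStr b

-- ===== PORT A =====
-- inner 'while i + 1 < len(...) and weeks_list[i+1] == end + 1' lookahead:
-- consumes the maximal +1-chain after `e`, returning (end, remaining suffix)
def pvAScan (e : Int) (rest : List Int) : Int × List Int :=
  match rest with
  | [] => (e, [])
  | y :: r => if y = e + 1 then pvAScan y r else (e, y :: r)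

-- termination measure for the outer while loop (cited by pvALoop's decreasing_by)
theorem pvAScan_len : ∀ (rest : List Int) (e : Int), (pvAScan e rest).2.length ≤ rest.length := by
  intro rest
  induction rest with
  | nil => intro e; simp [pvAScan]
  | cons y r ih =>
    intro e
    simp only [pvAScan]
    split
    · exact Nat.le_succ_of_le (ih y)
    · simp

-- outer 'while i < len(weeks_list)' loop of A
def pvALoop : List Int → List String
  | [] => []
  | x :: rest =>
    let p := pvAScan x rest
    pvFmt x p.1 :: pvALoop p.2
termination_by l => l.length
decreasing_by
  simpa using Nat.lt_succ_of_le (pvAScan_len rest x)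

def format_weeks_list (weeks_list : List Int) : String :=
  -- '"全学期" in weeks_list' can never hold for a list of ints, so the guard is the emptiness test
  if weeks_list.isEmpty then "1-20"
  else if weeks_list.length = 1 then PySem.Int.toStr weeks_list.headI
  else
    let ws := PySem.List.sorted (PySem.Set.ofList weeks_list) (fun x => x) false
    PySem.Str.join "," (pvALoop ws)

-- ===== PORT B =====
-- one step of B's reverse pass: extend the last appended run (runs[-1]) if x is one below
-- its start, else append (x, x); the run list is reversed into ascending order after the loop
def pvBStep (runs : List (Int × Int)) (x : Int) : List (Int × Int) :=
  match runs.getLast? with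
  | some (a, b) => if a = x + 1 then runs.dropLast ++ [(x, b)] else runs ++ [(x, x)]
  | none => [(x, x)]

def format_weeks_list_alt (weeks_list : List Int) : String :=
  if weeks_list.isEmpty then "1-20"
  else if weeks_list.length = 1 then PySem.Int.toStr weeks_list.headI
  else
    let weeks := PySem.List.sorted (PySem.Set.ofList weeks_list) (fun x => x) false
    let runs := (weeks.reverse.foldl pvBStep []).reverse
    PySem.Str.join "," (runs.map (fun p => pvFmt p.1 p.2))

-- ===== PRECONDITION & SPEC =====
def Spec_format_weeks_list (weeks_list : List Int) (out : String) : Prop := out = format_weeks_list_alt weeks_list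
instance (weeks_list : List Int) (out : String) : Decidable (Spec_format_weeks_list weeks_list out) := by unfold Spec_format_weeks_list; infer_instance

-- ===== CLAIM (what is proved, stated in full; the proofs are below) =====
def Claim_equal_format_weeks_list : Prop := ∀ (weeks_list : List Int), Dom_format_weeks_list weeks_list → Spec_format_weeks_list weeks_list (format_weeks_list weeks_list)

-- ===== LEMMAS AND PROOFS =====

-- B's step, re-expressed on the reversed (ascending-front) run list
def pvHStep (runs : List (Int × Int)) (x : Int) : List (Int × Int) :=
  match runs with
  | (a, b) :: t => if a = x + 1 then (x, b) :: t else (x, x) :: (a, b) :: t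
  | [] => [(x, x)]

theorem pvBStep_reverse (acc : List (Int × Int)) (x : Int) :
    pvBStep acc x = (pvHStep acc.reverse x).reverse := by
  rcases acc.eq_nil_or_concat with rfl | ⟨t, ⟨a, b⟩, rfl⟩
  · simp [pvBStep, pvHStep]
  · simp only [List.concat_eq_append, pvBStep, pvHStep, List.getLast?_concat,
      List.dropLast_concat, List.reverse_append, List.reverse_cons, List.reverse_nil,
      List.nil_append, List.cons_append]
    split <;> simp

theorem pvFoldl_pvBStep (l : List Int) : ∀ (acc : List (Int × Int)),
    l.foldl pvBStep acc = (l.foldl pvHStep acc.reverse).reverse := by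
  induction l with
  | nil => intro acc; simp
  | cons x l ih =>
    intro acc
    simp only [List.foldl_cons]
    rw [ih, pvBStep_reverse, List.reverse_reverse]

-- the run list on the ascending side, written as a foldr
def pvRuns (l : List Int) : List (Int × Int) := l.foldr (fun x acc => pvHStep acc x) []

theorem pvRuns_scan : ∀ (rest : List Int) (x : Int),
    pvRuns (x :: rest) = (x, (pvAScan x rest).1) :: pvRuns (pvAScan x rest).2 := by
  intro rest
  induction rest with
  | nil => intro x; simp [pvRuns, pvAScan, pvHStep]
  | cons y r ih =>
    intro x
    have hy := ih y
    by_cases h : y = x + 1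
    · have : pvRuns (x :: y :: r) = pvHStep (pvRuns (y :: r)) x := rfl
      rw [this, hy]
      simp [pvAScan, pvHStep, h]
    · have : pvRuns (x :: y :: r) = pvHStep (pvRuns (y :: r)) x := rfl
      rw [this, hy]
      simp only [pvAScan, if_neg h]
      simp only [pvHStep]
      rw [if_neg (by omega)]
      rw [← hy]

theorem pvALoop_eq_runs : ∀ (n : Nat) (ws : List Int), ws.length ≤ n →
    pvALoop ws = (pvRuns ws).map (fun p => pvFmt p.1 p.2) := by
  intro n
  induction n with
  | zero =>
    intro ws h
    have : ws = [] := List.eq_nil_of_length_eq_zero (Nat.le_zero.mp h)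
    subst this; simp [pvALoop, pvRuns]
  | succ n ih =>
    intro ws h
    match ws with
    | [] => simp [pvALoop, pvRuns]
    | x :: rest =>
      rw [pvALoop, pvRuns_scan]
      simp only [List.map_cons]
      congr 1
      exact ih _ (le_trans (pvAScan_len rest x) (Nat.le_of_succ_le_succ h))

-- ===== VERDICT (by name: the statement is the Claim_ definition above) =====
theorem format_weeks_list_spec : Claim_equal_format_weeks_list := by
  intro weeks_list _
  unfold Spec_format_weeks_list format_weeks_list format_weeks_list_alt
  split
  · rfl
  · split
    · rfl
    · dsimp only
      rw [pvFoldl_pvBStep, List.reverse_reverse, List.reverse_nil, List.foldl_reverse]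
      congr 1
      exact pvALoop_eq_runs _ _ (le_refl _)
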